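-- pv_equiv track=rewrite | github.com/raphaelmansuy/edgecrab | plugins/developer/json-toolbox/tools.py | _decode_pointer
-- ===== SOURCE A (Python) =====
-- def _decode_pointer(pointer):
--     if pointer == "":
--         return []
--     if not pointer.startswith("/"):
--         raise ValueError("pointer must be empty or start with '/'")
--     return [
--         token.replace("~1", "/").replace("~0", "~")
--         for token in pointer.lstrip("/").split("/")
--     ]
-- ===== SOURCE B (Python) =====
-- def _decode_pointer(pointer):
--     if pointer == "":
--         return []
--     if pointer[0] != "/":
--         raise ValueError("pointer must be empty or start with '/'")
--     n = len(pointer)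
--     i = 0
--     while i < n and pointer[i] == "/":
--         i += 1
--     tokens = []
--     cur = []
--     while i < n:
--         c = pointer[i]
--         if c == "/":
--             tokens.append("".join(cur))
--             cur = []
--             i += 1
--         elif c == "~" and i + 1 < n and pointer[i + 1] == "0":
--             cur.append("~")
--             i += 2
--         elif c == "~" and i + 1 < n and pointer[i + 1] == "1":
--             cur.append("/")
--             i += 2
--         else:
--             cur.append(c)
--             i += 1
--     tokens.append("".join(cur))
--     return tokens
-- ===== Notes on version B (the rewrite author's own statement) =====
-- stated objective: alternative
-- what changed: Replaced split('/') plus two whole-token .replace passes with a single left-to-right character scanner that splits on '/' and decodes ~0/~1 escapes in one pass over the string.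
import Mathlib
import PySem

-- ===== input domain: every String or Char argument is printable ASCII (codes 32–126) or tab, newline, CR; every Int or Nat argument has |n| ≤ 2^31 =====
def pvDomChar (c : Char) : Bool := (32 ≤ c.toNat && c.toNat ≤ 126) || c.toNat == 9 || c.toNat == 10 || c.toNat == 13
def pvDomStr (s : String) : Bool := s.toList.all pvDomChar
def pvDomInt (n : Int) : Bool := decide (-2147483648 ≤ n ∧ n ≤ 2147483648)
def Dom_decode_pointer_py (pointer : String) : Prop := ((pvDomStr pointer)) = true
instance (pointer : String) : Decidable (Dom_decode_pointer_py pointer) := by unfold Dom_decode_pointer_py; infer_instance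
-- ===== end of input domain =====

-- B replaces split + two .replace passes by a single-pass character scanner; same values, similar cost ("alternative").

-- ===== PORT A =====
-- lstrip("/") with the single stripped character '/' is exactly dropWhile (· == '/')
def decode_pointer_py (pointer : String) : List String :=
  if pointer = "" then []
  else
    -- the ValueError branch (pointer not starting with "/") is excluded by Pre_decode_pointer_py
    (PySem.Chars.splitOn (pointer.toList.dropWhile (· == '/')) ['/']).map
      (fun token => String.mk (PySem.Chars.replace (PySem.Chars.replace token ['~', '1'] ['/']) ['~', '0'] ['~']))

-- ===== PORT B =====
-- the scanner loop of Source B: split at '/', decode ~0/~1 on the fly, lone '~' kept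
def pvScan : List Char → List Char → List String
  | [], cur => [String.mk cur]
  | '/' :: rest, cur => String.mk cur :: pvScan rest []
  | '~' :: '0' :: rest, cur => pvScan rest (cur ++ ['~'])
  | '~' :: '1' :: rest, cur => pvScan rest (cur ++ ['/'])
  | c :: rest, cur => pvScan rest (cur ++ [c])

def decode_pointer_py_alt (pointer : String) : List String :=
  if pointer = "" then []
  else
    -- the ValueError branch is excluded by Pre_decode_pointer_py; the skip-leading-'/' loop is dropWhile
    pvScan (pointer.toList.dropWhile (· == '/')) []

-- ===== PRECONDITION & SPEC =====
-- Pre_ excludes exactly the inputs where A raises ValueError: a nonempty pointer not starting with "/"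
def Pre_decode_pointer_py (pointer : String) : Prop :=
  pointer = "" ∨ PySem.Str.startswith pointer "/" = true
instance (pointer : String) : Decidable (Pre_decode_pointer_py pointer) := by
  unfold Pre_decode_pointer_py; infer_instance

def pvWitness_decode_pointer_py : String := "/a~0b//c~1"

def Spec_decode_pointer_py (pointer : String) (out : List String) : Prop := out = decode_pointer_py_alt pointer
instance (pointer : String) (out : List String) : Decidable (Spec_decode_pointer_py pointer out) := by unfold Spec_decode_pointer_py; infer_instance

-- ===== CLAIM (what is proved, stated in full; the proofs are below) =====
def Claim_equal_decode_pointer_py : Prop := ∀ (pointer : String), Dom_decode_pointer_py pointer → Pre_decode_pointer_py pointer → Spec_decode_pointer_py pointer (decode_pointer_py pointer)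

-- ===== LEMMAS AND PROOFS =====

-- a clean recursion computing str.replace(s, "~1", "/")
def pvR1 : List Char → List Char
  | '~' :: '1' :: t => '/' :: pvR1 t
  | c :: t => c :: pvR1 t
  | [] => []

-- a clean recursion computing str.replace(s, "~0", "~")
def pvR0 : List Char → List Char
  | '~' :: '0' :: t => '~' :: pvR0 t
  | c :: t => c :: pvR0 t
  | [] => []

-- the one-pass escape decoder applied to a whole token
def pvEsc : List Char → List Char
  | '~' :: '0' :: t => '~' :: pvEsc t
  | '~' :: '1' :: t => '/' :: pvEsc t
  | c :: t => c :: pvEsc t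
  | [] => []

-- plain structural split on '/'
def pvSpl : List Char → List (List Char)
  | [] => [[]]
  | c :: r =>
    if c = '/' then [] :: pvSpl r
    else
      match pvSpl r with
      | t :: ts => (c :: t) :: ts
      | [] => [[c]]

theorem pvSpl_ne_nil (l : List Char) : pvSpl l ≠ [] := by
  induction l with
  | nil => simp [pvSpl]
  | cons c r ih =>
    simp only [pvSpl]
    split
    · simp
    · rcases h : pvSpl r with _ | ⟨t, ts⟩ <;> simp

theorem pvReplaceGo_eq_pvR1 (fuel : Nat) (l acc : List Char) (h : l.length ≤ fuel) :
    PySem.Chars.replace.go ['~', '1'] ['/'] fuel l acc = acc.reverse ++ pvR1 l := by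
  induction fuel generalizing l acc with
  | zero =>
    have : l = [] := by cases l <;> simp_all
    subst this
    simp [PySem.Chars.replace.go, pvR1]
  | succ fuel ih =>
    match l with
    | [] => simp [PySem.Chars.replace.go, pvR1]
    | [c] =>
      rw [PySem.Chars.replace.go]
      have hp : List.isPrefixOf ['~', '1'] [c] = false := by simp [List.isPrefixOf]
      simp only [hp, Bool.false_eq_true, if_false]
      rw [ih [] (c :: acc) (by simp)]
      simp [pvR1]
    | c :: d :: t' =>
      by_cases hcd : c = '~' ∧ d = '1'
      · obtain ⟨rfl, rfl⟩ := hcd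
        rw [PySem.Chars.replace.go]
        have hp : List.isPrefixOf ['~', '1'] ('~' :: '1' :: t') = true := by
          simp [List.isPrefixOf]
        simp only [hp, if_true]
        have hdrop : List.drop (['~', '1'] : List Char).length ('~' :: '1' :: t') = t' := rfl
        have hrev : (['/'] : List Char).reverse ++ acc = '/' :: acc := rfl
        rw [hdrop, hrev, ih t' ('/' :: acc) (by simp at h ⊢; omega)]
        simp [pvR1]
      · have hp : List.isPrefixOf ['~', '1'] (c :: d :: t') = false := by
          simp [List.isPrefixOf]; intro h1 h2; exact hcd ⟨h1.symm, h2.symm⟩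
        rw [PySem.Chars.replace.go]
        simp only [hp, Bool.false_eq_true, if_false]
        rw [ih (d :: t') (c :: acc) (by simp at h ⊢; omega)]
        have hr : pvR1 (c :: d :: t') = c :: pvR1 (d :: t') := by
          by_cases hc : c = '~'
          · have hd : d ≠ '1' := fun hh => hcd ⟨hc, hh⟩
            simp [pvR1, hd]
          · simp [pvR1, hc]
        simp [hr]

theorem pvReplaceGo_eq_pvR0 (fuel : Nat) (l acc : List Char) (h : l.length ≤ fuel) :
    PySem.Chars.replace.go ['~', '0'] ['~'] fuel l acc = acc.reverse ++ pvR0 l := by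
  induction fuel generalizing l acc with
  | zero =>
    have : l = [] := by cases l <;> simp_all
    subst this
    simp [PySem.Chars.replace.go, pvR0]
  | succ fuel ih =>
    match l with
    | [] => simp [PySem.Chars.replace.go, pvR0]
    | [c] =>
      rw [PySem.Chars.replace.go]
      have hp : List.isPrefixOf ['~', '0'] [c] = false := by simp [List.isPrefixOf]
      simp only [hp, Bool.false_eq_true, if_false]
      rw [ih [] (c :: acc) (by simp)]
      simp [pvR0]
    | c :: d :: t' =>
      by_cases hcd : c = '~' ∧ d = '0'
      · obtain ⟨rfl, rfl⟩ := hcd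
        rw [PySem.Chars.replace.go]
        have hp : List.isPrefixOf ['~', '0'] ('~' :: '0' :: t') = true := by
          simp [List.isPrefixOf]
        simp only [hp, if_true]
        have hdrop : List.drop (['~', '0'] : List Char).length ('~' :: '0' :: t') = t' := rfl
        have hrev : (['~'] : List Char).reverse ++ acc = '~' :: acc := rfl
        rw [hdrop, hrev, ih t' ('~' :: acc) (by simp at h ⊢; omega)]
        simp [pvR0]
      · have hp : List.isPrefixOf ['~', '0'] (c :: d :: t') = false := by
          simp [List.isPrefixOf]; intro h1 h2; exact hcd ⟨h1.symm, h2.symm⟩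
        rw [PySem.Chars.replace.go]
        simp only [hp, Bool.false_eq_true, if_false]
        rw [ih (d :: t') (c :: acc) (by simp at h ⊢; omega)]
        have hr : pvR0 (c :: d :: t') = c :: pvR0 (d :: t') := by
          by_cases hc : c = '~'
          · have hd : d ≠ '0' := fun hh => hcd ⟨hc, hh⟩
            simp [pvR0, hd]
          · simp [pvR0, hc]
        simp [hr]

theorem pvReplace_eq_pvR1 (l : List Char) :
    PySem.Chars.replace l ['~', '1'] ['/'] = pvR1 l := by
  rw [PySem.Chars.replace]
  simp only [List.isEmpty_cons, if_false]
  simpa using pvReplaceGo_eq_pvR1 l.length l [] le_rfl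

theorem pvReplace_eq_pvR0 (l : List Char) :
    PySem.Chars.replace l ['~', '0'] ['~'] = pvR0 l := by
  rw [PySem.Chars.replace]
  simp only [List.isEmpty_cons, if_false]
  simpa using pvReplaceGo_eq_pvR0 l.length l [] le_rfl

theorem pvR1_head (t : List Char) (h : t.head? ≠ some '0') : (pvR1 t).head? ≠ some '0' := by
  rcases t with _ | ⟨c, t'⟩
  · simp [pvR1]
  · rcases t' with _ | ⟨d, t''⟩
    · simpa [pvR1] using by simpa using h
    · by_cases hc : c = '~' <;> by_cases hd : d = '1' <;>
        simp_all [pvR1]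

theorem pvR0_pvR1_eq_pvEsc (l : List Char) : pvR0 (pvR1 l) = pvEsc l := by
  fun_induction pvEsc l with
  | case1 t ih =>
    have h1 : pvR1 ('~' :: '0' :: t) = '~' :: '0' :: pvR1 t := by simp [pvR1]
    have h0 : pvR0 ('~' :: '0' :: pvR1 t) = '~' :: pvR0 (pvR1 t) := by simp [pvR0]
    rw [h1, h0, ih]
  | case2 t ih =>
    have h1 : pvR1 ('~' :: '1' :: t) = '/' :: pvR1 t := by simp [pvR1]
    have h0 : pvR0 ('/' :: pvR1 t) = '/' :: pvR0 (pvR1 t) := by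
      rcases hh : pvR1 t with _ | ⟨d, t'⟩ <;> simp [pvR0]
    rw [h1, h0, ih]
  | case3 c t hne0 hne1 ih =>
    by_cases hc : c = '~'
    · subst hc
      have ht1 : pvR1 ('~' :: t) = '~' :: pvR1 t := by
        rcases t with _ | ⟨d, t'⟩
        · simp [pvR1]
        · have hd : d ≠ '1' := fun hh => hne1 t' rfl (by rw [hh])
          simp [pvR1, hd]
      have ht0 : t.head? ≠ some '0' := by
        rcases t with _ | ⟨d, t'⟩
        · simp
        · have hd : d ≠ '0' := fun hh => hne0 t' rfl (by rw [hh])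
          simpa using hd
      have h0 := pvR1_head t ht0
      have hstep : pvR0 ('~' :: pvR1 t) = '~' :: pvR0 (pvR1 t) := by
        rcases hh : pvR1 t with _ | ⟨d, t'⟩
        · simp [pvR0]
        · have hd : d ≠ '0' := by
            intro hdd; rw [hh, hdd] at h0; simp at h0
          simp [pvR0, hd]
      rw [ht1, hstep, ih]
    · have ht1 : pvR1 (c :: t) = c :: pvR1 t := by
        rcases t with _ | ⟨d, t'⟩ <;> simp [pvR1, hc]
      have ht0 : pvR0 (c :: pvR1 t) = c :: pvR0 (pvR1 t) := by
        rcases hh : pvR1 t with _ | ⟨d, t'⟩ <;> simp [pvR0, hc]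
      rw [ht1, ht0, ih]
  | case4 => simp [pvR1, pvR0, pvEsc]

theorem pvSplitOnGo_eq_pvSpl (fuel : Nat) (l cur : List Char) (acc : List (List Char))
    (h : l.length ≤ fuel) :
    PySem.Chars.splitOn.go ['/'] fuel l cur acc =
      acc.reverse ++
        (match pvSpl l with
         | t :: ts => (cur.reverse ++ t) :: ts
         | [] => [cur.reverse]) := by
  induction fuel generalizing l cur acc with
  | zero =>
    have : l = [] := by cases l <;> simp_all
    subst this
    simp [PySem.Chars.splitOn.go, pvSpl]
  | succ fuel ih =>
    match l with
    | [] => simp [PySem.Chars.splitOn.go, pvSpl]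
    | c :: t =>
      by_cases hc : c = '/'
      · subst hc
        rw [PySem.Chars.splitOn.go]
        have hp : List.isPrefixOf ['/'] ('/' :: t) = true := by simp [List.isPrefixOf]
        simp only [hp, if_true]
        have hdrop : List.drop (['/'] : List Char).length ('/' :: t) = t := rfl
        rw [hdrop, ih t [] (List.reverse cur :: acc) (by simp only [List.length_cons] at h; omega)]
        rcases hs : pvSpl t with _ | ⟨u, us⟩
        · exact absurd hs (pvSpl_ne_nil t)
        · simp [pvSpl, hs]
      · rw [PySem.Chars.splitOn.go]
        have hp : List.isPrefixOf ['/'] (c :: t) = false := by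
          simp [List.isPrefixOf]; intro hh; exact absurd hh.symm hc
        simp only [hp, Bool.false_eq_true, if_false]
        rw [ih t (c :: cur) acc (by simp only [List.length_cons] at h; omega)]
        rcases hs : pvSpl t with _ | ⟨u, us⟩
        · exact absurd hs (pvSpl_ne_nil t)
        · simp [pvSpl, hc, hs]

theorem pvSplitOn_eq_pvSpl (l : List Char) : PySem.Chars.splitOn l ['/'] = pvSpl l := by
  rw [PySem.Chars.splitOn]
  rw [pvSplitOnGo_eq_pvSpl (l.length + 1) l [] [] (by omega)]
  rcases hs : pvSpl l with _ | ⟨u, us⟩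
  · exact absurd hs (pvSpl_ne_nil l)
  · simp

theorem pvSpl_head (l : List Char) (u : List Char) (us : List (List Char))
    (h : pvSpl l = u :: us) :
    u = [] ∨ ∃ e u', l.head? = some e ∧ e ≠ '/' ∧ u = e :: u' := by
  rcases l with _ | ⟨e, r⟩
  · left
    simp [pvSpl] at h
    exact h.1
  · by_cases he : e = '/'
    · left
      subst he
      simp [pvSpl] at h
      exact h.1
    · right
      rcases hr : pvSpl r with _ | ⟨t, ts⟩
      · exact absurd hr (pvSpl_ne_nil r)
      · refine ⟨e, t, rfl, he, ?_⟩
        simp [pvSpl, he, hr] at h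
        exact h.1.symm

theorem pvScan_eq (l cur : List Char) :
    pvScan l cur =
      (match pvSpl l with
       | t :: ts => String.mk (cur ++ pvEsc t) :: ts.map (fun u => String.mk (pvEsc u))
       | [] => []) := by
  fun_induction pvScan l cur with
  | case1 cur => simp [pvSpl, pvEsc]
  | case2 rest cur ih =>
    rcases hs : pvSpl rest with _ | ⟨u, us⟩
    · exact absurd hs (pvSpl_ne_nil rest)
    · rw [ih, hs]
      have h1 : pvSpl ('/' :: rest) = [] :: u :: us := by simp [pvSpl, hs]
      rw [h1]
      simp [pvEsc]
  | case3 rest cur ih =>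
    rcases hs : pvSpl rest with _ | ⟨u, us⟩
    · exact absurd hs (pvSpl_ne_nil rest)
    · rw [ih, hs]
      have h1 : pvSpl ('~' :: '0' :: rest) = ('~' :: '0' :: u) :: us := by
        simp [pvSpl, hs]
      rw [h1]
      have h2 : pvEsc ('~' :: '0' :: u) = '~' :: pvEsc u := by simp [pvEsc]
      simp [h2]
  | case4 rest cur ih =>
    rcases hs : pvSpl rest with _ | ⟨u, us⟩
    · exact absurd hs (pvSpl_ne_nil rest)
    · rw [ih, hs]
      have h1 : pvSpl ('~' :: '1' :: rest) = ('~' :: '1' :: u) :: us := by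
        simp [pvSpl, hs]
      rw [h1]
      have h2 : pvEsc ('~' :: '1' :: u) = '/' :: pvEsc u := by simp [pvEsc]
      simp [h2]
  | case5 c rest cur hslash hne0 hne1 ih =>
    have hc : c ≠ '/' := fun hh => absurd hh hslash
    rcases hs : pvSpl rest with _ | ⟨u, us⟩
    · exact absurd hs (pvSpl_ne_nil rest)
    · rw [ih, hs]
      have h1 : pvSpl (c :: rest) = (c :: u) :: us := by simp [pvSpl, hc, hs]
      rw [h1]
      have hesc : pvEsc (c :: u) = c :: pvEsc u := by
        by_cases hct : c = '~'
        · subst hct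
          rcases pvSpl_head rest u us hs with hu | ⟨e, u', he, _, hu⟩
          · subst hu; simp [pvEsc]
          · have he0 : e ≠ '0' := by
              intro hh
              rcases rest with _ | ⟨d, r'⟩
              · simp at he
              · simp at he; exact hne0 r' rfl (by rw [he, hh])
            have he1 : e ≠ '1' := by
              intro hh
              rcases rest with _ | ⟨d, r'⟩
              · simp at he
              · simp at he; exact hne1 r' rfl (by rw [he, hh])
            subst hu
            simp [pvEsc, he0, he1]
        · rcases u with _ | ⟨e, u'⟩ <;> simp [pvEsc, hct]
      simp [hesc]

-- ===== VERDICT (by name: the statement is the Claim_ definition above) =====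
theorem decode_pointer_py_spec : Claim_equal_decode_pointer_py := by
  intro pointer _ _
  unfold Spec_decode_pointer_py decode_pointer_py decode_pointer_py_alt
  by_cases h : pointer = ""
  · simp [h]
  · simp only [h, if_false]
    rw [pvScan_eq, pvSplitOn_eq_pvSpl]
    rcases hs : pvSpl (pointer.toList.dropWhile (· == '/')) with _ | ⟨u, us⟩
    · exact absurd hs (pvSpl_ne_nil _)
    · simp [pvReplace_eq_pvR1, pvReplace_eq_pvR0, pvR0_pvR1_eq_pvEsc]
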